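-- pv_equiv track=rewrite | github.com/seyoung755/AlgorithmTest | Programmers/매출 하락 최소화.py | solution
-- ===== SOURCE A (Python) =====
-- from collections import defaultdict
--
-- def solution(sales, links):
--     answer = 0
--     #====== 문제 요약 ======
--     # 1번 직원은 CEO이다(root node)
--     # 팀장과 팀원이라는 관계가 존재한다
--     # 모든 직원은 누군가의 팀원이다 -> leaf node
--     # 최대 2개의 팀에 소속될 수 있고, 이 경우 한 팀에서는 팀장, 다른 팀에서는 팀원이어야 한다.
--
--     # 워크숍 기간 동안 모든 팀에서 최소 1명 이상 워크숍에 참석시킴 (교집합도 인정)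
--     # 단, 참석하는 직원들의 하루평균 매출액의 합이 최소가 되어야 한다.
--     #====== 문제 요약 끝 ======
--
--
--     # ========= 생각 정리 =========
--
--     # 부모 - 자식 노드가 발생하는 단위가 하나의 팀이 된다
--     # 교집합에 속하는 원소의 특징은 하나에서는 팀장, 하나에서는 팀원인 노드이다.
--     # 모든 경우의 수를 조사하는 것은 시간초과, 즉 dp를 이용해야 한다.
--
--
--     answer = 0
--     N = len(sales)
--     team = defaultdict(list)
--
--     # d[n][0] : n번 노드 참석
--     # d[n][1] : n번 노드 불참
--     d = [[0,0] for _ in range(N+1)]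
--
--     # visited = [False for _ in range(N+1)]
--     max_sale = 10000
--
--     # 각 팀에서 최소한 한명이라도 참석했는지 여부 파악
--     is_part = {}
--
--     for head, tail in links:
--         team[head].append(tail)
--         is_part[head] = False
--
--
--     def dfs(cur_node):
--
--         d[cur_node][0] = sales[cur_node-1]
--         d[cur_node][1] = 0
--         # 현재 노드가 팀장인 경우
--         if cur_node in team:
--             for child in team[cur_node]:
--
--                 dfs(child)
--
--         # leaf node 업데이트 끝
--             min_part = max_sale
--             for child in team[cur_node]:
--                 # 참석 기회비용이 가장 작은 그룹원 구하기
--                 min_part = min(min_part, d[child][0] - d[child][1])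
--
--                 # 그룹원 최소 비용을 더한다
--                 for i in range(2):
--                     d[cur_node][i] += min(d[child][0], d[child][1])
--                     # 그룹원 한명이라도 참석한 경우
--                     if d[child][1] >= d[child][0]:
--                         is_part[cur_node] = True
--
--             # 한명도 참석 안한 경우
--             if not is_part[cur_node]:
--                 d[cur_node][1] += min_part
--
-- #         # 현재 노드가 leaf node인 경우
--         else:
--
--             pass
--
--
--
--     dfs(1)
--
--     return min(d[1])
-- ===== SOURCE B (Python) =====
-- from collections import defaultdict
--
-- def solution(sales, links):
--     # iterative explicit-stack post-order instead of recursive dfs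
--     N = len(sales)
--     team = defaultdict(list)
--     is_part = {}
--     for head, tail in links:
--         team[head].append(tail)
--         is_part[head] = False
--     max_sale = 10000
--     d = [[0, 0] for _ in range(N + 1)]
--     stack = [(1, False)]
--     while stack:
--         node, expanded = stack.pop()
--         if not expanded:
--             d[node][0] = sales[node - 1]
--             d[node][1] = 0
--             stack.append((node, True))
--             if node in team:
--                 for child in reversed(team[node]):
--                     stack.append((child, False))
--         elif node in team:
--             min_part = max_sale
--             for child in team[node]:
--                 min_part = min(min_part, d[child][0] - d[child][1])
--                 for i in range(2):
--                     d[node][i] += min(d[child][0], d[child][1])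
--                     if d[child][1] >= d[child][0]:
--                         is_part[node] = True
--             if not is_part[node]:
--                 d[node][1] += min_part
--     return min(d[1])
-- ===== Notes on version B (the rewrite author's own statement) =====
-- stated objective: alternative
-- what changed: Replaces A's recursive dfs (mutating d/is_part through nested calls) by an explicit-stack iterative post-order: each node is pushed unexpanded (popping it sets d[node] and re-pushes it expanded after its children), and the node-processing block runs on the expanded pop once all children are done.
-- outside the precondition, e.g. on solution([5, 3], [[1, 2], [1, 2]]): A returns 3, B returns 3; on solution([5, 3], [[1, -1]]): A returns 5, B returns 5
import Mathlib
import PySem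

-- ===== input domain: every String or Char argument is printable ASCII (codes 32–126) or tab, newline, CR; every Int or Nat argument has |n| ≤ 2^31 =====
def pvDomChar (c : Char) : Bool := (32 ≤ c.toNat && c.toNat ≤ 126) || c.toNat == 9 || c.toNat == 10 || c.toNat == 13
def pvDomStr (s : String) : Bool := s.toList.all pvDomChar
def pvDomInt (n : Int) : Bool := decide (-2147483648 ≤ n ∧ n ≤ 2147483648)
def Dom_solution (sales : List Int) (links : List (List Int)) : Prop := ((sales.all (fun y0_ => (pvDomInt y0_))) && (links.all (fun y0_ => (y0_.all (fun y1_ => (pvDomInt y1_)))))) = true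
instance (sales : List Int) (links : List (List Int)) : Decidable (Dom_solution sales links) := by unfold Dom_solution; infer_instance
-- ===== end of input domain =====

-- B replaces A's recursive dfs by an explicit-stack iterative post-order over the same team tree (different decomposition, same cost).


-- ===== PORT A =====
-- Shared representation of the Python mutable state: (d, is_part).
-- d : Int → Int × Int models the list `d` (entry n is d[n]); is_part : Int → Bool models the dict
-- `is_part` (Python reads is_part[n] only after writing False for that key, so a total map with
-- default false is exact on every input either program completes on).
abbrev PvState := (Int → Int × Int) × (Int → Bool)

-- `team = defaultdict(list)` built by `for head, tail in links: team[head].append(tail)`.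
-- A link that is not a 2-element list makes Python raise ValueError (excluded by Pre_); here it is skipped.
def pvTeam (links : List (List Int)) : Int → List Int :=
  links.foldl (fun t l =>
    match l with
    | [h, tl] => fun x => if x = h then t x ++ [tl] else t x
    | _ => t) (fun _ => [])

-- `d[cur_node][0] = sales[cur_node-1]; d[cur_node][1] = 0`; out-of-range sales index raises in
-- Python (excluded by Pre_), here defaulted to 0.
def pvEnter (sales : List Int) (n : Int) (s : PvState) : PvState :=
  (fun x => if x = n then ((PySem.List.pyGet? sales (n - 1)).getD 0, 0) else s.1 x, s.2)

-- the node-processing block of A's dfs (and of B's expanded pop): min_part scan, the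
-- `for i in range(2)` accumulation with the is_part update, and the min_part fallback
def pvAccum (team : Int → List Int) (n : Int) (s : PvState) : PvState :=
  let r := (team n).foldl
    (fun (acc : Int × PvState) c =>
      let mp := min acc.1 ((acc.2.1 c).1 - (acc.2.1 c).2)
      let st := (List.range 2).foldl
        (fun (st : PvState) i =>
          let add := min (st.1 c).1 (st.1 c).2
          let dn := st.1 n
          let dn' := if i = 0 then (dn.1 + add, dn.2) else (dn.1, dn.2 + add)
          ((fun x => if x = n then dn' else st.1 x),
           if (st.1 c).2 ≥ (st.1 c).1 then (fun x => if x = n then true else st.2 x) else st.2))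
        acc.2
      (mp, st))
    ((10000 : Int), s)
  if r.2.2 n = false then
    ((fun x => if x = n then ((r.2.1 n).1, (r.2.1 n).2 + r.1) else r.2.1 x), r.2.2)
  else r.2

-- A's recursive dfs.  The Nat is a fuel guard making the recursion total (Python diverges on
-- cyclic links, excluded by Pre_): each dfs call consumes one unit, threaded left-to-right
-- through the children exactly like B's loop counts its first pops; none = fuel exhausted.
-- `min r f` is a no-op on values the functions actually produce (remaining fuel never exceeds
-- the fuel given, see dfsA_fuel_le) and only justifies termination.
mutual
def dfsA (sales : List Int) (team : Int → List Int) : Nat → Int → PvState → Option (PvState × Nat)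
  | 0, _, _ => none
  | f + 1, n, s =>
    let s1 := pvEnter sales n s
    if (team n).isEmpty then some (s1, f)          -- leaf: `else: pass`
    else
      match dfsKids sales team (team n) f s1 with  -- `for child in team[cur_node]: dfs(child)`
      | none => none
      | some (s2, r) => some (pvAccum team n s2, r)
termination_by f _ _ => (f, 0)
decreasing_by
  exact Prod.Lex.left _ _ (Nat.lt_succ_self _)
def dfsKids (sales : List Int) (team : Int → List Int) : List Int → Nat → PvState → Option (PvState × Nat)
  | [], f, s => some (s, f)
  | c :: cs, f, s =>
    match dfsA sales team f c s with
    | none => none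
    | some (s', r) => dfsKids sales team cs (min r f) s'
termination_by cs f _ => (f, cs.length + 1)
decreasing_by
  · exact Prod.Lex.right _ (Nat.succ_pos _)
  · rcases Nat.lt_or_ge (min r f) f with h | h
    · exact Prod.Lex.left _ _ h
    · have hm : min r f = f := Nat.le_antisymm (Nat.min_le_right _ _) h
      rw [hm]; exact Prod.Lex.right _ (by simp)
end

def solution (sales : List Int) (links : List (List Int)) : Int :=
  let team := pvTeam links
  match dfsA sales team (links.length + 2) 1 ((fun _ => (0, 0)), (fun _ => false)) with
  | some (s, _) => min (s.1 1).1 (s.1 1).2          -- return min(d[1])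
  | none => 0                                        -- fuel guard only; unreachable under Pre_

-- ===== PORT B =====
-- Source B's while-loop over the explicit stack (list head = top of stack).  The fuel guard consumes
-- one unit per UNEXPANDED pop (= one dfs call of A), so the same budget as A's; expanded pops
-- and the final empty-stack exit are free; none = fuel exhausted.
def loopB (sales : List Int) (team : Int → List Int) : Nat → List (Int × Bool) → PvState → Option PvState
  | _, [], s => some s
  | f, (n, true) :: rest, s =>
      loopB sales team f rest (if (team n).isEmpty then s else pvAccum team n s)
  | 0, (_, false) :: _, _ => none
  | f + 1, (n, false) :: rest, s =>
      -- push (node, True) then the children reversed: popped in original order, so the list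
      -- stack is children (in order) ++ (n, true) :: rest
      loopB sales team f ((team n).map (fun c => (c, false)) ++ (n, true) :: rest) (pvEnter sales n s)
termination_by f st _ => (f, st.length)

def solution_alt (sales : List Int) (links : List (List Int)) : Int :=
  let team := pvTeam links
  match loopB sales team (links.length + 2) [(1, false)] ((fun _ => (0, 0)), (fun _ => false)) with
  | some s => min (s.1 1).1 (s.1 1).2
  | none => 0

-- ===== PRECONDITION & SPEC =====
-- pvReach computes the set of employees reachable from the CEO (employee 1) along links — a
-- plain graph closure over the INPUT (links.length rounds saturate), a shape condition only; it
-- computes nothing of either port's sales DP.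
def pvReachStep (links : List (List Int)) (S : List Int) : List Int :=
  links.foldl (fun S l =>
    match l with
    | [h, t] => if h ∈ S ∧ t ∉ S then S ++ [t] else S
    | _ => S) S

def pvReach (links : List (List Int)) : List Int :=
  (pvReachStep links)^[links.length] [1]

-- Pre_ is the problem's natural domain restricted to what the programs actually look at: every
-- link unpacks as [head, tail], and on the component reachable from employee 1 the tails are
-- employees 2..len(sales) and pairwise distinct (each employee has one team leader, the CEO none).
-- Outside Pre_ Python A raises (IndexError/ValueError), recurses forever on reachable cycles, or
-- — on reachable negative tails (Python's list-index wraparound) and duplicate reachable tails —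
-- returns a value that B also returns (see cites); links unreachable from employee 1 are ignored
-- by both programs and left unconstrained.
def Pre_solution (sales : List Int) (links : List (List Int)) : Prop :=
  sales ≠ [] ∧
  (∀ l ∈ links, l.length = 2) ∧
  (∀ l ∈ links, l.getD 0 0 ∈ pvReach links →
      2 ≤ l.getD 1 0 ∧ l.getD 1 0 ≤ (sales.length : Int)) ∧
  ((links.filter (fun l => decide (l.getD 0 0 ∈ pvReach links))).map (fun l => l.getD 1 0)).Nodup
instance (sales : List Int) (links : List (List Int)) : Decidable (Pre_solution sales links) := by
  unfold Pre_solution; infer_instance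

def pvWitness_solution : List Int × List (List Int) := ([10, 20, 30], [[1, 2], [1, 3]])

def Spec_solution (sales : List Int) (links : List (List Int)) (out : Int) : Prop := out = solution_alt sales links
instance (sales : List Int) (links : List (List Int)) (out : Int) : Decidable (Spec_solution sales links out) := by unfold Spec_solution; infer_instance

-- ===== CLAIM (what is proved, stated in full; the proofs are below) =====
def Claim_equal_solution : Prop := ∀ (sales : List Int) (links : List (List Int)), Dom_solution sales links → Pre_solution sales links → Spec_solution sales links (solution sales links)

-- ===== LEMMAS AND PROOFS =====

-- remaining fuel never exceeds the fuel supplied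
theorem dfsKids_fuel_le (sales : List Int) (team : Int → List Int) :
    ∀ (cs : List Int) (f : Nat) (s s' : PvState) (r : Nat),
      dfsKids sales team cs f s = some (s', r) → r ≤ f := by
  intro cs
  induction cs with
  | nil => intro f s s' r h; simp [dfsKids] at h; omega
  | cons c cs ih =>
    intro f s s' r h
    simp only [dfsKids] at h
    cases hA : dfsA sales team f c s with
    | none => rw [hA] at h; simp at h
    | some p =>
      rw [hA] at h
      have := ih (min p.2 f) p.1 s' r h
      omega

theorem dfsA_fuel_le (sales : List Int) (team : Int → List Int) :
    ∀ (f : Nat) (n : Int) (s s' : PvState) (r : Nat),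
      dfsA sales team f n s = some (s', r) → r ≤ f := by
  intro f n s s' r h
  cases f with
  | zero => simp [dfsA] at h
  | succ f =>
    simp only [dfsA] at h
    by_cases hE : (team n).isEmpty
    · simp [hE] at h; omega
    · simp only [hE] at h
      cases hK : dfsKids sales team (team n) f (pvEnter sales n s) with
      | none => rw [hK] at h; simp at h
      | some p =>
        rw [hK] at h
        simp at h
        have := dfsKids_fuel_le sales team (team n) f _ p.1 p.2 hK
        omega

-- one dfs call of A is simulated exactly by B's stack loop, fuel included (both directions:
-- the loop reaches `rest` with A's resulting state and remaining fuel, and fuel exhaustion coincides)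
theorem sim (sales : List Int) (team : Int → List Int) :
    ∀ (f : Nat) (n : Int) (s : PvState) (rest : List (Int × Bool)),
      loopB sales team f ((n, false) :: rest) s =
        match dfsA sales team f n s with
        | none => none
        | some (s', r) => loopB sales team r rest s' := by
  intro f
  induction f using Nat.strong_induction_on with
  | _ f IH =>
    intro n s rest
    cases f with
    | zero => simp [loopB, dfsA]
    | succ f =>
      have K : ∀ (cs : List Int) (g : Nat) (s : PvState), g ≤ f →
          loopB sales team g (cs.map (fun c => (c, false)) ++ (n, true) :: rest) s =
            match dfsKids sales team cs g s with
            | none => none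
            | some (s', r) => loopB sales team r ((n, true) :: rest) s' := by
        intro cs
        induction cs with
        | nil => intro g s hg; simp [dfsKids]
        | cons c cs ihc =>
          intro g s hg
          simp only [List.map_cons, List.cons_append]
          rw [IH g (by omega) c s (cs.map (fun c => (c, false)) ++ (n, true) :: rest)]
          simp only [dfsKids]
          cases hA : dfsA sales team g c s with
          | none => simp
          | some p =>
            obtain ⟨s1, r⟩ := p
            have hle : r ≤ g := dfsA_fuel_le sales team g c s s1 r hA
            dsimp only
            rw [Nat.min_eq_left hle]
            exact ihc r s1 (le_trans hle hg)
      simp only [loopB, dfsA]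
      by_cases hE : (team n).isEmpty
      · have : team n = [] := List.isEmpty_iff.mp hE
        simp [this, loopB]
      · simp only [hE]
        rw [K (team n) f (pvEnter sales n s) (le_refl f)]
        cases hK : dfsKids sales team (team n) f (pvEnter sales n s) with
        | none => simp
        | some p => simp [loopB, hE]

-- the two ports agree on EVERY input (fuel exhaustion included); Pre_ is only needed so that
-- the Python originals themselves return
theorem solution_eq_alt : ∀ (sales : List Int) (links : List (List Int)),
    solution sales links = solution_alt sales links := by
  intro sales links
  unfold solution solution_alt
  dsimp only
  rw [sim sales (pvTeam links) (links.length + 2) 1 ((fun _ => (0, 0)), (fun _ => false)) []]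
  cases h : dfsA sales (pvTeam links) (links.length + 2) 1 ((fun _ => (0, 0)), (fun _ => false)) with
  | none => simp
  | some p => simp [loopB]

-- ===== VERDICT (by name: the statement is the Claim_ definition above) =====
theorem solution_spec : Claim_equal_solution := by
  intro sales links _ _
  unfold Spec_solution
  exact solution_eq_alt sales links
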